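-- pv_equiv track=rewrite | github.com/vclabskku/ai-challenge-2021 | pyaichtools/pyaichtools/converter.py | div_by_attr
-- ===== SOURCE A (Python) =====
-- def div_by_attr(ann_seq):
--     attr_list = []
--     attr_cnt = 0
--     st = 0
--     for id, ann_ele in enumerate(ann_seq):
--         if ann_ele == "argst":
--             attr_cnt += 1
--         elif ann_ele == "argen":
--             attr_cnt -= 1
--         if attr_cnt == 0:
--             attr_list.append(ann_seq[st:id+1])
--             st = id+1
--     return attr_list
-- ===== SOURCE B (Python) =====
-- def div_by_attr(ann_seq):
--     # Event-driven rewrite: pass 1 keeps only the bracket markers with their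
--     # positions; pass 2 walks markers only, emitting whole runs of plain
--     # elements as singleton segments in bulk and marker-delimited slices at
--     # closes; a final flush emits the trailing balanced run.
--     marks = [(i, e) for i, e in enumerate(ann_seq) if e in ("argst", "argen")]
--     out = []
--     start = 0
--     diff = 0
--     for i, e in marks:
--         if diff == 0:
--             # balanced stretch of plain elements: each is its own segment
--             out.extend([x] for x in ann_seq[start:i])
--             start = i
--         diff += 1 if e == "argst" else -1
--         if diff == 0:
--             out.append(ann_seq[start:i + 1])
--             start = i + 1
--     if diff == 0:
--         out.extend([x] for x in ann_seq[start:])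
--     return out
-- ===== Notes on version B (the rewrite author's own statement) =====
-- stated objective: alternative
-- what changed: B is event-driven: a first pass extracts only the 'argst'/'argen' markers with their positions, a second loop walks these marker events alone (never the plain elements), emitting each balanced run of plain elements in bulk as singleton slices and each marker-closed block as one slice, with a final flush for the trailing balanced run; A walks every element with a running counter.
import Mathlib
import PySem

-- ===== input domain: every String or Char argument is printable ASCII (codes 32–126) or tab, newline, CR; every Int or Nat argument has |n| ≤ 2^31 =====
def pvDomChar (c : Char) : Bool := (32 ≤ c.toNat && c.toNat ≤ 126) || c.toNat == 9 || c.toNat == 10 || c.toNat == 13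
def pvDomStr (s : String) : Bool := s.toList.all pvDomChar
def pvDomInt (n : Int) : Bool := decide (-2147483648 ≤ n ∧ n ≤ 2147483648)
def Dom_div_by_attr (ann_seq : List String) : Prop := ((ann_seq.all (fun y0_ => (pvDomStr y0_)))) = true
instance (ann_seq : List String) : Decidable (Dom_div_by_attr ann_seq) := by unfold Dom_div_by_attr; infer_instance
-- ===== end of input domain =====

-- B replaces A's element-by-element counter loop by an event-driven split: it first
-- extracts the marker positions, then iterates over the markers only (objective: alternative).

-- ===== PORT A =====
-- A's for-loop: state (attr_cnt, st, attr_list), index id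
def div_by_attr_go (ann_seq : List String) : List String → Int → Int → Int →
    List (List String) → List (List String)
  | [], _, _, _, acc => acc
  | e :: rest, id, cnt, st, acc =>
    let cnt' := if e = "argst" then cnt + 1 else if e = "argen" then cnt - 1 else cnt
    if cnt' = 0 then
      div_by_attr_go ann_seq rest (id + 1) cnt' (id + 1)
        (acc ++ [PySem.List.slice ann_seq (some st) (some (id + 1))])
    else
      div_by_attr_go ann_seq rest (id + 1) cnt' st acc

def div_by_attr (ann_seq : List String) : List (List String) :=
  div_by_attr_go ann_seq ann_seq 0 0 0 []

-- ===== PORT B =====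
-- pass 1 of B: the marker events [(i, e) for i, e in enumerate(ann_seq) if e in ("argst","argen")]
def div_marks (ann_seq : List String) : List (Int × String) :=
  (PySem.List.enumerate ann_seq 0).filter (fun p => p.2 == "argst" || p.2 == "argen")

-- pass 2 of B: the for-loop over marks, state (start, diff, out)
def div_alt_go (ann : List String) : List (Int × String) → Int → Int →
    List (List String) → Int × Int × List (List String)
  | [], start, diff, out => (start, diff, out)
  | (i, e) :: rest, start, diff, out =>
    let start1 := if diff = 0 then i else start
    let out1 := if diff = 0 then
        out ++ (PySem.List.slice ann (some start) (some i)).map (fun x => [x])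
      else out
    let diff' := diff + (if e = "argst" then 1 else -1)
    if diff' = 0 then
      div_alt_go ann rest (i + 1) diff'
        (out1 ++ [PySem.List.slice ann (some start1) (some (i + 1))])
    else
      div_alt_go ann rest start1 diff' out1

-- final flush of the trailing balanced run
def div_by_attr_alt (ann_seq : List String) : List (List String) :=
  let s := div_alt_go ann_seq (div_marks ann_seq) 0 0 []
  if s.2.1 = 0 then
    s.2.2 ++ (PySem.List.slice ann_seq (some s.1) none).map (fun x => [x])
  else s.2.2

-- ===== PRECONDITION & SPEC =====
def Spec_div_by_attr (ann_seq : List String) (out : List (List String)) : Prop := out = div_by_attr_alt ann_seq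
instance (ann_seq : List String) (out : List (List String)) : Decidable (Spec_div_by_attr ann_seq out) := by unfold Spec_div_by_attr; infer_instance

-- ===== CLAIM (what is proved, stated in full; the proofs are below) =====
def Claim_equal_div_by_attr : Prop := ∀ (ann_seq : List String), Dom_div_by_attr ann_seq → Spec_div_by_attr ann_seq (div_by_attr ann_seq)

-- ===== LEMMAS AND PROOFS =====

-- proof-side view of B's pass 1 with an explicit Nat start index
def mIdx : List String → Nat → List (Int × String)
  | [], _ => []
  | e :: r, k =>
    if e == "argst" || e == "argen" then ((k : Int), e) :: mIdx r (k + 1)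
    else mIdx r (k + 1)

lemma marks_eq_mIdx : ∀ (l : List String) (k : Nat),
    (PySem.List.enumerate l (k : Int)).filter (fun p => p.2 == "argst" || p.2 == "argen")
      = mIdx l k := by
  intro l
  induction l with
  | nil => intro k; simp [mIdx, PySem.List.enumerate_nil]
  | cons e r ih =>
    intro k
    rw [PySem.List.enumerate_cons, List.filter_cons]
    have h1 : (k : Int) + 1 = ((k + 1 : Nat) : Int) := by push_cast; ring
    rw [h1, ih (k + 1)]
    by_cases hm : (e == "argst" || e == "argen") = true <;> simp [mIdx, hm]

lemma mIdx_ge : ∀ (l : List String) (k : Nat) (p : Int × String), p ∈ mIdx l k →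
    ∃ t : Nat, p.1 = (t : Int) ∧ k ≤ t := by
  intro l
  induction l with
  | nil => intro k p hp; simp [mIdx] at hp
  | cons e r ih =>
    intro k p hp
    unfold mIdx at hp
    split at hp
    · rcases List.mem_cons.mp hp with h | h
      · exact ⟨k, by simp [h], le_refl k⟩
      · obtain ⟨t, ht, hk⟩ := ih (k + 1) p h
        exact ⟨t, ht, by omega⟩
    · obtain ⟨t, ht, hk⟩ := ih (k + 1) p hp
      exact ⟨t, ht, by omega⟩

-- the flush at the end of B
def finB (ann : List String) (s : Int × Int × List (List String)) : List (List String) :=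
  if s.2.1 = 0 then
    s.2.2 ++ (PySem.List.slice ann (some s.1) none).map (fun x => [x])
  else s.2.2

-- deferring one singleton segment: starting B's loop one element earlier (at a plain
-- element inside a balanced run) and omitting that singleton from the accumulator
-- gives the same final result.
lemma div_shift (ann : List String) (m : List (Int × String)) (i : Nat)
    (hm : ∀ p ∈ m, ∃ t : Nat, p.1 = (t : Int) ∧ i + 1 ≤ t)
    (hi : i < ann.length) (acc : List (List String)) :
    finB ann (div_alt_go ann m ((i : Nat) : Int) 0 acc)
      = finB ann (div_alt_go ann m (((i : Nat) : Int) + 1)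
          0 (acc ++ [PySem.List.slice ann (some (i : Int)) (some ((i : Int) + 1))])) := by
  have hdrop : ann.drop i = ann[i] :: ann.drop (i + 1) :=
    List.drop_eq_getElem_cons hi
  have hsing : PySem.List.slice ann (some (i : Int)) (some ((i : Int) + 1)) = [ann[i]] := by
    have : ((i : Int) + 1) = ((i + 1 : Nat) : Int) := by push_cast; ring
    rw [this, PySem.List.slice_natCast, hdrop, Nat.add_sub_cancel_left]
    rfl
  cases m with
  | nil =>
    simp only [div_alt_go, finB, if_true]
    have h1 : ((i : Int) + 1) = ((i + 1 : Nat) : Int) := by push_cast; ring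
    rw [hsing, h1, PySem.List.slice_from_natCast, PySem.List.slice_from_natCast, hdrop]
    simp only [List.map_cons, List.append_assoc, List.singleton_append]
  | cons p rest =>
    obtain ⟨j, e⟩ := p
    obtain ⟨t, ht, hit⟩ := hm (j, e) (List.mem_cons_self ..)
    simp only at ht
    subst ht
    simp only [div_alt_go]
    have hflush :
        acc ++ (PySem.List.slice ann (some (i : Int)) (some (t : Int))).map (fun x => [x])
          = (acc ++ [PySem.List.slice ann (some (i : Int)) (some ((i : Int) + 1))])
            ++ (PySem.List.slice ann (some ((i : Int) + 1)) (some (t : Int))).map (fun x => [x]) := by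
      have h1 : ((i : Int) + 1) = ((i + 1 : Nat) : Int) := by push_cast; ring
      rw [hsing, h1, PySem.List.slice_natCast, PySem.List.slice_natCast, hdrop]
      have h2 : t - i = (t - (i + 1)) + 1 := by omega
      rw [h2, List.take_succ_cons]
      simp only [List.map_cons, List.append_assoc, List.singleton_append]
    simp only [if_true]
    rw [hflush]

-- the main simulation invariant: A's loop from index i with counter cnt and start st
-- matches B's marker loop over mIdx with the same counter and start.
lemma div_main (ann : List String) : ∀ (l : List String) (i st : Nat) (cnt : Int)
    (acc : List (List String)),
    l = ann.drop i → (cnt = 0 → st = i) →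
    div_by_attr_go ann l (i : Int) cnt (st : Int) acc
      = finB ann (div_alt_go ann (mIdx l i) (st : Int) cnt acc) := by
  intro l
  induction l with
  | nil =>
    intro i st cnt acc hdrop hst
    simp only [div_by_attr_go, mIdx, div_alt_go, finB]
    by_cases hc : cnt = 0
    · have : st = i := hst hc
      subst this
      rw [if_pos hc, PySem.List.slice_from_natCast, ← hdrop]
      simp
    · rw [if_neg hc]
  | cons e rest ih =>
    intro i st cnt acc hdrop hst
    have hi : i < ann.length := by
      by_contra h
      rw [List.drop_eq_nil_of_le (by omega)] at hdrop
      simp at hdrop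
    have hrest : rest = ann.drop (i + 1) := by
      have h := List.drop_eq_getElem_cons hi (l := ann)
      rw [h] at hdrop
      exact (List.cons_eq_cons.mp hdrop).2
    have hcast : ((i : Int) + 1) = ((i + 1 : Nat) : Int) := by push_cast; ring
    by_cases hmark : (e == "argst" || e == "argen") = true
    · -- marker element: one step of B's loop
      have hmIdx : mIdx (e :: rest) i = ((i : Int), e) :: mIdx rest (i + 1) := by
        simp [mIdx, hmark]
      have hcnt' : (if e = "argst" then cnt + 1 else if e = "argen" then cnt - 1 else cnt)
          = cnt + (if e = "argst" then 1 else -1) := by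
        by_cases h1 : e = "argst"
        · simp [h1]
        · have h2 : e = "argen" := by
            rcases Bool.or_eq_true_iff.mp hmark with h | h
            · exact absurd (by simpa using h) h1
            · simpa using h
          simp [h2, sub_eq_add_neg]
      have hstart1 : (if cnt = 0 then (i : Int) else (st : Int)) = (st : Int) := by
        by_cases hc : cnt = 0
        · rw [if_pos hc, hst hc]
        · rw [if_neg hc]
      have hout1 : (if cnt = 0 then
            acc ++ (PySem.List.slice ann (some (st : Int)) (some (i : Int))).map (fun x => [x])
          else acc) = acc := by
        by_cases hc : cnt = 0
        · rw [if_pos hc, hst hc, PySem.List.slice_natCast]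
          simp
        · rw [if_neg hc]
      rw [hmIdx]
      simp only [div_by_attr_go, div_alt_go, hcnt', hstart1, hout1]
      by_cases hz : cnt + (if e = "argst" then 1 else -1) = 0
      · rw [if_pos hz, if_pos hz, hcast, hz]
        exact ih (i + 1) (i + 1) 0 _ hrest (fun _ => rfl)
      · rw [if_neg hz, if_neg hz, hcast, ih (i + 1) st _ acc hrest (fun h => absurd h hz)]
    · -- plain element: B's marker list skips it
      have hmIdx : mIdx (e :: rest) i = mIdx rest (i + 1) := by
        simp [mIdx, hmark]
      have hst' : ¬ e = "argst" := by
        intro h; apply hmark; simp [h]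
      have hen : ¬ e = "argen" := by
        intro h; apply hmark; simp [h]
      rw [hmIdx]
      simp only [div_by_attr_go, if_neg hst', if_neg hen]
      by_cases hc : cnt = 0
      · subst hc
        have hsti : st = i := hst rfl
        subst hsti
        rw [if_pos rfl, hcast,
          ih (st + 1) (st + 1) 0 (acc ++ [PySem.List.slice ann (some (st : Int)) (some ((st + 1 : Nat) : Int))]) hrest (fun _ => rfl)]
        rw [← hcast,
          ← div_shift ann (mIdx rest (st + 1)) st (fun p hp => mIdx_ge rest (st + 1) p hp) hi acc]
      · rw [if_neg hc, hcast, ih (i + 1) st cnt acc hrest (fun h => absurd h hc)]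

-- ===== VERDICT (by name: the statement is the Claim_ definition above) =====
theorem div_by_attr_spec : Claim_equal_div_by_attr := by
  intro ann_seq _
  have h := div_main ann_seq ann_seq 0 0 0 [] (by simp) (fun _ => rfl)
  have hm := marks_eq_mIdx ann_seq 0
  simp only [Nat.cast_zero] at h hm
  unfold Spec_div_by_attr div_by_attr div_by_attr_alt div_marks
  rw [hm, h]
  rfl
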